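-- pv_equiv track=rewrite | github.com/yangjung-woo/programmers | ctrlz.py | solution
-- ===== SOURCE A (Python) =====
-- def solution(s):
--
--     temp = list(s.split())
--     temp.reverse()
--     answer = 0
--     flag = False
--     for t in temp:
--         if t =='Z':
--             flag = True
--             continue
--         if flag:
--             flag=False
--             continue
--         if flag == False:
--             answer+= int(t)
--
--     return answer
-- ===== SOURCE B (Python) =====
-- def solution(s):
--     tokens = s.split()
--     total = 0
--     for t, nxt in zip(tokens, tokens[1:] + ['']):
--         if t != 'Z' and nxt != 'Z':
--             total += int(t)
--     return total
-- ===== Notes on version B (the rewrite author's own statement) =====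
-- stated objective: simpler
-- what changed: Replaces A's reverse-and-flag state machine with a single forward pass that pairs each token with its successor (zip lookahead) and adds a token exactly when neither it nor its successor is the undo marker.
import Mathlib
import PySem

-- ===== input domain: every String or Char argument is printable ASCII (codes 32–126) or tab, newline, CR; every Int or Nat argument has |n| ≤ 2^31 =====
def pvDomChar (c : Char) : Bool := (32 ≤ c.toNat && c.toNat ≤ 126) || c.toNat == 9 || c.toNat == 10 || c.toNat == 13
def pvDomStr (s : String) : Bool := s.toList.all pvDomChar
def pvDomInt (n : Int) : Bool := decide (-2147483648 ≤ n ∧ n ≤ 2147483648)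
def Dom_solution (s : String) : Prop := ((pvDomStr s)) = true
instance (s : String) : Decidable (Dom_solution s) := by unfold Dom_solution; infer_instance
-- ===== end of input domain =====

-- ===== PORT A =====
-- B changes only the decomposition (forward lookahead instead of reverse+flag); same cost.
-- int(t) ported as (PySem.Int.ofStr? t).getD 0; Pre_ excludes the inputs where Python raises.
def pvIntD (t : String) : Int := (PySem.Int.ofStr? t).getD 0

-- A: reverse the token list, then fold with a skip flag set by 'Z'.
def pvStepA (st : Int × Bool) (t : String) : Int × Bool :=
  if t = "Z" then (st.1, true)
  else if st.2 then (st.1, false)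
  else (st.1 + pvIntD t, false)

def solution (s : String) : Int :=
  (((PySem.Str.split₀ s).reverse).foldl pvStepA (0, false)).1

-- ===== PORT B =====
-- B: one forward pass over (token, successor) pairs built by zip with a "" sentinel.
def pvBsum : List String → Int
  | [] => 0
  | t :: rest =>
      (if t ≠ "Z" ∧ (rest.headD "") ≠ "Z" then pvIntD t else 0) + pvBsum rest

def solution_alt (s : String) : Int := pvBsum (PySem.Str.split₀ s)

-- ===== PRECONDITION & SPEC =====
-- Pre_ excludes exactly the inputs where Python A raises ValueError: a token that is
-- added (not 'Z' and not followed by 'Z') but is not a valid int literal.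
def Pre_solution (s : String) : Prop :=
  ∀ p ∈ ((PySem.Str.split₀ s).zip ((PySem.Str.split₀ s).drop 1 ++ [""])),
    p.1 ≠ "Z" → p.2 ≠ "Z" → (PySem.Int.ofStr? p.1).isSome
instance (s : String) : Decidable (Pre_solution s) := by unfold Pre_solution; infer_instance
def pvWitness_solution : String := "1 2 Z 3"

def Spec_solution (s : String) (out : Int) : Prop := out = solution_alt s
instance (s : String) (out : Int) : Decidable (Spec_solution s out) := by unfold Spec_solution; infer_instance

-- ===== CLAIM (what is proved, stated in full; the proofs are below) =====
def Claim_equal_solution : Prop := ∀ (s : String), Dom_solution s → Pre_solution s → Spec_solution s (solution s)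

-- ===== LEMMAS AND PROOFS =====

-- A's foldl over the reversed list is a foldr over the list; its state is
-- (B's sum of the list, "the head is Z").
theorem pvFoldr_eq (l : List String) :
    List.foldr (fun t st => pvStepA st t) ((0 : Int), false) l
      = (pvBsum l, decide (l.headD "" = "Z")) := by
  induction l with
  | nil => simp [pvBsum]
  | cons t rest ih =>
      rw [List.foldr_cons, ih]
      by_cases hz : t = "Z"
      · subst hz; simp [pvStepA, pvBsum]
      · by_cases hn : rest.headD "" = "Z" <;>
          · simp only [List.headD_eq_head?_getD] at hn ⊢
            simp [pvStepA, pvBsum, hz, hn]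
            try ring

-- ===== VERDICT (by name: the statement is the Claim_ definition above) =====
theorem solution_spec : Claim_equal_solution := by
  intro s _ _
  unfold Spec_solution solution solution_alt
  rw [List.foldl_reverse, pvFoldr_eq]
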